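-- pv_equiv track=rewrite | github.com/Damyanmd/softuni_python | Advance/Tuples and sets/Longest Intersection.py | checker_for_longest_intersection
-- ===== SOURCE A (Python) =====
-- def checker_for_longest_intersection(new_length, previous_length):
--     checker = []
--     for _ in range(new_length[0], new_length[1] + 1):
--         checker.append(_)
--     if len(checker) > len(previous_length):
--         return checker
--     else:
--         return previous_length
-- ===== SOURCE B (Python) =====
-- def checker_for_longest_intersection(new_length, previous_length):
--     count = max(0, new_length[1] + 1 - new_length[0])
--     if count > len(previous_length):
--         return list(range(new_length[0], new_length[1] + 1))
--     return previous_length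
-- ===== Notes on version B (the rewrite author's own statement) =====
-- stated objective: simpler
-- what changed: B decides which list is longer via the closed-form segment length max(0, hi+1-lo) and materializes the range list only when it wins, instead of A's loop that always builds the list and then measures it.
import Mathlib
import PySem

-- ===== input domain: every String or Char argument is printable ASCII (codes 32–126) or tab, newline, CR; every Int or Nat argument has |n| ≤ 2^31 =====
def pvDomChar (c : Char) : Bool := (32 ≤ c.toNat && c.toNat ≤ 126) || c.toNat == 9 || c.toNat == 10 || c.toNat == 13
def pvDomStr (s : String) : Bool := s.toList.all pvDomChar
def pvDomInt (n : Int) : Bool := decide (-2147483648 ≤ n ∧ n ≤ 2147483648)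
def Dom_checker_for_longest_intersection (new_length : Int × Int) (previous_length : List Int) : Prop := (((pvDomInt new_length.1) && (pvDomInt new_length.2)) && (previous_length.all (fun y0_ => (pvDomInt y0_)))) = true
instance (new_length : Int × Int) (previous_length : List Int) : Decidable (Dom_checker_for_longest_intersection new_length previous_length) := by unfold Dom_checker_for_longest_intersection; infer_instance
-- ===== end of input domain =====

-- ===== PORT A =====
-- B replaces A's build-then-measure loop by a closed-form length; the range list is built only when returned (objective: simpler).
def checker_for_longest_intersection (new_length : Int × Int) (previous_length : List Int) : List Int :=
  let checker := (PySem.List.pyRange new_length.1 (new_length.2 + 1) 1).foldl (fun acc x => acc ++ [x]) []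
  if checker.length > previous_length.length then checker else previous_length

-- ===== PORT B =====
def checker_for_longest_intersection_alt (new_length : Int × Int) (previous_length : List Int) : List Int :=
  let count : Int := max 0 (new_length.2 + 1 - new_length.1)
  if count > (previous_length.length : Int) then PySem.List.pyRange new_length.1 (new_length.2 + 1) 1
  else previous_length

-- ===== PRECONDITION & SPEC =====
def Spec_checker_for_longest_intersection (new_length : Int × Int) (previous_length : List Int) (out : List Int) : Prop := out = checker_for_longest_intersection_alt new_length previous_length
instance (new_length : Int × Int) (previous_length : List Int) (out : List Int) : Decidable (Spec_checker_for_longest_intersection new_length previous_length out) := by unfold Spec_checker_for_longest_intersection; infer_instance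

-- ===== CLAIM (what is proved, stated in full; the proofs are below) =====
def Claim_equal_checker_for_longest_intersection : Prop := ∀ (new_length : Int × Int) (previous_length : List Int), Dom_checker_for_longest_intersection new_length previous_length → Spec_checker_for_longest_intersection new_length previous_length (checker_for_longest_intersection new_length previous_length)

-- ===== LEMMAS AND PROOFS =====

-- ===== VERDICT (by name: the statement is the Claim_ definition above) =====
theorem foldl_app_singleton (l acc : List Int) : l.foldl (fun acc x => acc ++ [x]) acc = acc ++ l := by
  induction l generalizing acc with
  | nil => simp
  | cons h t ih => simp [List.foldl, ih]

theorem checker_for_longest_intersection_spec : Claim_equal_checker_for_longest_intersection := by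
  intro nl pl _
  unfold Spec_checker_for_longest_intersection checker_for_longest_intersection checker_for_longest_intersection_alt
  simp only [foldl_app_singleton, List.nil_append, PySem.List.length_pyRange_one]
  have h : ((nl.2 + 1 - nl.1).toNat > pl.length) ↔ (max 0 (nl.2 + 1 - nl.1) > (pl.length : Int)) := by omega
  split_ifs with h1 h2 h2 <;> first | rfl | (exfalso; omega)
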